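-- pv_equiv track=rewrite | github.com/danilo-p/eng-soft-ii-lab9 | main.py | get_authors_ranking
-- ===== SOURCE A (Python) =====
-- def get_files_and_authors(contributions):
--     files = []
--     authors = []
--     for author, file in contributions.keys():
--         if not (author in authors):
--             authors.append(author)
--
--         if not (file in files):
--             files.append(file)
--
--     return files, authors
--
-- def sort_ranking_by_score(raking_entry):
--     return raking_entry[1]
--
-- def get_authors_ranking(authorships, contributions, ranking_size):
--     files, authors = get_files_and_authors(contributions)
--
--     ranking = []
--     for target_author in authors:
--         total_score = 0
--         for _, author, score in authorships:
--             if author == target_author: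
--                 total_score += score
--         ranking.append((target_author, total_score))
--
--     ranking.sort(key=sort_ranking_by_score, reverse=True)
--
--     return ranking[:ranking_size]
-- ===== SOURCE B (Python) =====
-- def get_authors_ranking(authorships, contributions, ranking_size):
--     authors = list(dict.fromkeys(author for author, _ in contributions))
--     totals = {}
--     for _, author, score in authorships:
--         totals[author] = totals.get(author, 0) + score
--     ranking = [(author, totals.get(author, 0)) for author in authors]
--     ranking.sort(key=lambda entry: entry[1], reverse=True)
--     return ranking[:ranking_size]
-- ===== Notes on version B (the rewrite author's own statement) =====
-- stated objective: faster
-- what changed: Replaces the nested scan (for each distinct author, rescan all authorships) by a single pass that aggregates per-author totals into a dict, drops the unused files list, and keeps the same stable reverse sort and slice.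
import Mathlib
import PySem

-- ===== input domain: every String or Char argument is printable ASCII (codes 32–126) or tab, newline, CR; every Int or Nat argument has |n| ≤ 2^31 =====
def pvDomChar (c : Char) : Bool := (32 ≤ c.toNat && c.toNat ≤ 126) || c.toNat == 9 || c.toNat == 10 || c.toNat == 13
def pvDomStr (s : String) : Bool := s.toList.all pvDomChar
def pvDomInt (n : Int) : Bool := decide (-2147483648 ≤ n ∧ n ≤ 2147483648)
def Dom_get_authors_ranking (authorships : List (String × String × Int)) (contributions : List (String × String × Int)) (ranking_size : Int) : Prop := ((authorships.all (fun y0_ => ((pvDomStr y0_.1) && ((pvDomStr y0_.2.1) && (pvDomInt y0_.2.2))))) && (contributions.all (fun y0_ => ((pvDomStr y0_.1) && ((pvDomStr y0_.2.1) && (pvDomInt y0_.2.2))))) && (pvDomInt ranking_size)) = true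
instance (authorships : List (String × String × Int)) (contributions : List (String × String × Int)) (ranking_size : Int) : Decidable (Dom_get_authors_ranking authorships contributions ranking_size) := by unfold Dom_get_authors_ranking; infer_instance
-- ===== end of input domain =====

-- B replaces A's per-author rescan of authorships by one dict-aggregation pass (faster); same sort and slice.

-- ===== PORT A =====
-- get_files_and_authors(contributions): dedup loop over the dict's keys, building (files, authors)
def pv_get_files_and_authors (contributions : List (String × String × Int)) : List String × List String :=
  contributions.foldl
    (fun (acc : List String × List String) e =>
      let authors := if e.1 ∈ acc.2 then acc.2 else acc.2 ++ [e.1]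
      let files := if e.2.1 ∈ acc.1 then acc.1 else acc.1 ++ [e.2.1]
      (files, authors))
    ([], [])

def get_authors_ranking (authorships : List (String × String × Int)) (contributions : List (String × String × Int)) (ranking_size : Int) : List (String × Int) :=
  let fa := pv_get_files_and_authors contributions
  let authors := fa.2
  let ranking := authors.foldl
    (fun r target_author =>
      r ++ [(target_author,
             authorships.foldl
               (fun total_score e => if e.2.1 == target_author then total_score + e.2.2 else total_score)
               0)])
    []
  -- ranking.sort(key=sort_ranking_by_score, reverse=True); return ranking[:ranking_size]
  PySem.List.slice (PySem.List.sorted ranking (fun raking_entry => raking_entry.2) true) none (some ranking_size)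

-- ===== PORT B =====
def get_authors_ranking_alt (authorships : List (String × String × Int)) (contributions : List (String × String × Int)) (ranking_size : Int) : List (String × Int) :=
  let authors := PySem.List.dedup (contributions.map (fun e => e.1))
  let totals := authorships.foldl
    (fun (d : PySem.Dict String Int) e => d.insert e.2.1 (d.getD e.2.1 0 + e.2.2))
    PySem.Dict.empty
  let ranking := authors.map (fun author => (author, totals.getD author 0))
  PySem.List.slice (PySem.List.sorted ranking (fun entry => entry.2) true) none (some ranking_size)

-- ===== PRECONDITION & SPEC =====
def Spec_get_authors_ranking (authorships : List (String × String × Int)) (contributions : List (String × String × Int)) (ranking_size : Int) (out : List (String × Int)) : Prop := out = get_authors_ranking_alt authorships contributions ranking_size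
instance (authorships : List (String × String × Int)) (contributions : List (String × String × Int)) (ranking_size : Int) (out : List (String × Int)) : Decidable (Spec_get_authors_ranking authorships contributions ranking_size out) := by unfold Spec_get_authors_ranking; infer_instance

-- ===== CLAIM (what is proved, stated in full; the proofs are below) =====
def Claim_equal_get_authors_ranking : Prop := ∀ (authorships : List (String × String × Int)) (contributions : List (String × String × Int)) (ranking_size : Int), Dom_get_authors_ranking authorships contributions ranking_size → Spec_get_authors_ranking authorships contributions ranking_size (get_authors_ranking authorships contributions ranking_size)

-- ===== LEMMAS AND PROOFS =====

-- A's authors accumulator is the second component of a two-accumulator loop; split it off.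
theorem pv_authors_eq (contributions : List (String × String × Int)) :
    (pv_get_files_and_authors contributions).2
      = PySem.List.dedup (contributions.map (fun e => e.1)) := by
  have hsplit :
      pv_get_files_and_authors contributions
        = (contributions.foldl (fun acc e => if e.2.1 ∈ acc then acc else acc ++ [e.2.1]) [],
           contributions.foldl (fun acc e => if e.1 ∈ acc then acc else acc ++ [e.1]) []) := by
    unfold pv_get_files_and_authors
    exact PySem.List.foldl_prod_mk
      (f := fun acc e => if e.2.1 ∈ acc then acc else acc ++ [e.2.1])
      (g := fun acc e => if e.1 ∈ acc then acc else acc ++ [e.1]) contributions [] []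
  rw [hsplit]
  show contributions.foldl (fun acc e => if e.1 ∈ acc then acc else acc ++ [e.1]) []
        = PySem.List.dedup (contributions.map (fun e => e.1))
  rw [PySem.List.dedup_eq_ofList, ← PySem.Set.update_empty,
      PySem.Set.update_map_eq_foldl_add]
  exact PySem.List.foldl_congr_mem contributions _ _ [] (fun s e _ => (PySem.Set.add_eq_ite s e.1).symm)

-- The dict of totals reads back exactly A's per-author rescan sum.
theorem pv_totals_eq (authorships : List (String × String × Int)) (a : String)
    (d : PySem.Dict String Int) :
    (authorships.foldl (fun (d : PySem.Dict String Int) e => d.insert e.2.1 (d.getD e.2.1 0 + e.2.2)) d).getD a 0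
      = authorships.foldl (fun t e => if e.2.1 == a then t + e.2.2 else t) (d.getD a 0) := by
  induction authorships generalizing d with
  | nil => rfl
  | cons e l ih =>
      simp only [List.foldl_cons]
      rw [ih]
      congr 1
      rw [PySem.Dict.getD_insert]
      by_cases h : e.2.1 = a
      · subst h; simp
      · have h' : a ≠ e.2.1 := fun hh => h hh.symm
        simp [h', beq_eq_false_iff_ne.mpr h]

-- ===== VERDICT (by name: the statement is the Claim_ definition above) =====
theorem get_authors_ranking_spec : Claim_equal_get_authors_ranking := by
  intro authorships contributions ranking_size _
  show get_authors_ranking authorships contributions ranking_size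
        = get_authors_ranking_alt authorships contributions ranking_size
  unfold get_authors_ranking get_authors_ranking_alt
  dsimp only
  rw [pv_authors_eq]
  congr 1
  congr 1
  rw [PySem.List.foldl_append_singleton_eq_map]
  refine List.map_congr_left ?_
  intro a _
  rw [pv_totals_eq]
  rfl
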